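-- pv_equiv track=rewrite | github.com/povijarrro/workspacepython | adventofcode/adventofcode2017/day07_17.py | get_unbalanced
-- ===== SOURCE A (Python) =====
-- def get_unbalanced(lst:list[tuple[str,int]])->str:
--     ma = max(lst,key = lambda t:t[1])
--     mi = min(lst,key = lambda t:t[1])
--     weights = [t[1] for t in lst]
--     max_count = weights.count(ma[1])
--     min_count = weights.count(mi[1])
--     if len(lst) <= 1 or max_count == min_count:
--         return None
--     elif max_count == 1:
--         return ma,ma[1]-mi[1]
--     else:
--         return mi,mi[1]-ma[1]
-- ===== SOURCE B (Python) =====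
-- def get_unbalanced(lst: list[tuple[str, int]]):
--     # sort by weight (stable); the odd one out sits at one end of the sorted list
--     s = sorted(lst, key=lambda t: t[1])
--     mi = s[0]
--     ma = s[-1]
--     lo, hi = mi[1], ma[1]
--     minc = 0
--     while minc < len(s) and s[minc][1] == lo:
--         minc += 1
--     maxc = 0
--     while maxc < len(s) and s[len(s) - 1 - maxc][1] == hi:
--         maxc += 1
--     if len(s) <= 1 or maxc == minc:
--         return None
--     if maxc == 1:
--         return ma, hi - lo
--     return mi, lo - hi
-- ===== Notes on version B (the rewrite author's own statement) =====
-- stated objective: alternative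
-- what changed: Replaces A's separate max/min/count passes by a stable sort on weight: the first-occurring minimum is the sorted head, the max is the sorted tail, and the multiplicities are read by scanning the equal-weight blocks at the two ends of the sorted list.
import Mathlib
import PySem

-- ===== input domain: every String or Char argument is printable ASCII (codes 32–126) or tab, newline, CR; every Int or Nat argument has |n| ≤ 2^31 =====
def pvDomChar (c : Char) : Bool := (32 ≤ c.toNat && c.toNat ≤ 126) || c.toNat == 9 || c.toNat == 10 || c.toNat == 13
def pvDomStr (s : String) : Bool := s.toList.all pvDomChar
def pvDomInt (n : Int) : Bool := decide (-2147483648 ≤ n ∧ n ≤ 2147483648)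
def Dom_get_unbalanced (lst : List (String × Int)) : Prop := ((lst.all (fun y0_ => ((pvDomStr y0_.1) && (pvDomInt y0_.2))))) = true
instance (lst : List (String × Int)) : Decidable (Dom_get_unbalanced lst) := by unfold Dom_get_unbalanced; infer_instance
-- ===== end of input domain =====

-- B replaces A's separate max/min/count passes by a stable sort on weight, reading min/max and their multiplicities off the two ends of the sorted list; Pre_ excludes the empty list, on which Python A raises ValueError.


-- ===== PORT A =====
def get_unbalanced (lst : List (String × Int)) : Option ((String × Int) × Int) :=
  match PySem.List.max? lst (fun t => t.2), PySem.List.min? lst (fun t => t.2) with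
  | some ma, some mi =>
    let weights := lst.map (fun t => t.2)
    let max_count := weights.count ma.2
    let min_count := weights.count mi.2
    if lst.length ≤ 1 ∨ max_count = min_count then none
    else if max_count = 1 then some (ma, ma.2 - mi.2)
    else some (mi, mi.2 - ma.2)
  | _, _ => none    -- unreachable under Pre_ (Python raises ValueError on [])

-- ===== PORT B =====
-- the `while … == w` scan from one end of the sorted list
def countPrefix (w : Int) : List (String × Int) → Nat
  | [] => 0
  | x :: t => if x.2 = w then countPrefix w t + 1 else 0

def get_unbalanced_alt (lst : List (String × Int)) : Option ((String × Int) × Int) :=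
  let s := PySem.List.sorted lst (fun t => t.2) false
  match s with
  | [] => none    -- Python B raises IndexError here (outside Pre_)
  | mi :: _ =>
    let ma := s.reverse.headD mi      -- s[-1]
    let lo := mi.2
    let hi := ma.2
    let minc := countPrefix lo s
    let maxc := countPrefix hi s.reverse
    if s.length ≤ 1 ∨ maxc = minc then none
    else if maxc = 1 then some (ma, hi - lo)
    else some (mi, lo - hi)

-- ===== PRECONDITION & SPEC =====
-- Pre_ excludes exactly the empty list, on which Python A raises ValueError.
def Pre_get_unbalanced (lst : List (String × Int)) : Prop := lst ≠ []
instance (lst : List (String × Int)) : Decidable (Pre_get_unbalanced lst) := by unfold Pre_get_unbalanced; infer_instance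
def pvWitness_get_unbalanced : (List (String × Int)) := [("a", 1), ("b", 2), ("c", 2)]

def Spec_get_unbalanced (lst : List (String × Int)) (out : Option ((String × Int) × Int)) : Prop := out = get_unbalanced_alt lst
instance (lst : List (String × Int)) (out : Option ((String × Int) × Int)) : Decidable (Spec_get_unbalanced lst out) := by unfold Spec_get_unbalanced; infer_instance

-- ===== CLAIM (what is proved, stated in full; the proofs are below) =====
def Claim_equal_get_unbalanced : Prop := ∀ (lst : List (String × Int)), Dom_get_unbalanced lst → Pre_get_unbalanced lst → Spec_get_unbalanced lst (get_unbalanced lst)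

-- ===== LEMMAS AND PROOFS =====

-- head of insertBy is the running-minimum step
theorem head?_insertBy (x : String × Int) (acc : List (String × Int)) :
    (PySem.List.insertBy (fun a b : String × Int => decide (a.2 < b.2)) x acc).head? =
      (match acc.head? with
       | none => some x
       | some m => if x.2 < m.2 then some x else some m) := by
  cases acc with
  | nil => simp [PySem.List.insertBy]
  | cons y ys =>
    simp only [PySem.List.insertBy, List.head?_cons]
    split_ifs with h <;> simp_all

theorem head?_foldl_insertBy (xs : List (String × Int)) : ∀ (acc : List (String × Int)),
    (xs.foldl (fun acc x => PySem.List.insertBy (fun a b : String × Int => decide (a.2 < b.2)) x acc) acc).head?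
      = xs.foldl (fun acc x =>
          match acc with
          | none => some x
          | some m => if x.2 < m.2 then some x else some m) acc.head? := by
  induction xs with
  | nil => intro acc; simp
  | cons x t ih =>
    intro acc
    simp only [List.foldl_cons]
    rw [ih, head?_insertBy]

-- the sorted head is Python's min(lst, key=weight): the FIRST element of minimal weight
theorem head?_sorted_eq_min? (lst : List (String × Int)) :
    (PySem.List.sorted lst (fun t => t.2) false).head? = PySem.List.min? lst (fun t => t.2) := by
  rw [PySem.List.sorted_eq_foldl_insertBy, head?_foldl_insertBy lst []]
  simp only [PySem.List.min?, List.head?]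
  exact List.foldl_ext _ _ none (fun a b _ => by cases a <;> rfl)

-- scanning the equal-weight block at the head of a (≤)-sorted list counts all occurrences of that minimal weight
theorem countPrefix_eq_count_le {l : List (String × Int)} {w : Int}
    (hp : List.Pairwise (fun a b : String × Int => a.2 ≤ b.2) l) (hall : ∀ y ∈ l, w ≤ y.2) :
    countPrefix w l = (l.map (fun t => t.2)).count w := by
  induction l with
  | nil => simp [countPrefix]
  | cons x t ih =>
    rcases List.pairwise_cons.mp hp with ⟨hx, ht⟩
    by_cases hxw : x.2 = w
    · simp only [countPrefix, if_pos hxw, List.map_cons, List.count_cons]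
      rw [ih ht (fun y hy => hall y (List.mem_cons_of_mem x hy))]
      simp [hxw]
    · have hwx : w < x.2 := lt_of_le_of_ne (hall x (List.mem_cons_self)) (fun h => hxw h.symm)
      have hz : ((x :: t).map (fun t => t.2)).count w = 0 := by
        refine List.count_eq_zero.mpr ?_
        intro hmem
        rcases List.mem_map.mp hmem with ⟨y, hy, hye⟩
        rcases List.mem_cons.mp hy with rfl | hyt
        · exact hxw hye
        · exact absurd hye (by have := lt_of_lt_of_le hwx (hx y hyt); omega)
      rw [show countPrefix w (x :: t) = 0 by simp [countPrefix, hxw], hz]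

-- the (≥)-sorted twin, used on the reversed list for the maximal weight
theorem countPrefix_eq_count_ge {l : List (String × Int)} {w : Int}
    (hp : List.Pairwise (fun a b : String × Int => b.2 ≤ a.2) l) (hall : ∀ y ∈ l, y.2 ≤ w) :
    countPrefix w l = (l.map (fun t => t.2)).count w := by
  induction l with
  | nil => simp [countPrefix]
  | cons x t ih =>
    rcases List.pairwise_cons.mp hp with ⟨hx, ht⟩
    by_cases hxw : x.2 = w
    · simp only [countPrefix, if_pos hxw, List.map_cons, List.count_cons]
      rw [ih ht (fun y hy => hall y (List.mem_cons_of_mem x hy))]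
      simp [hxw]
    · have hwx : x.2 < w := lt_of_le_of_ne (hall x (List.mem_cons_self)) hxw
      have hz : ((x :: t).map (fun t => t.2)).count w = 0 := by
        refine List.count_eq_zero.mpr ?_
        intro hmem
        rcases List.mem_map.mp hmem with ⟨y, hy, hye⟩
        rcases List.mem_cons.mp hy with rfl | hyt
        · exact hxw hye
        · exact absurd hye (by have := lt_of_le_of_lt (hx y hyt) hwx; omega)
      rw [show countPrefix w (x :: t) = 0 by simp [countPrefix, hxw], hz]

-- if the maximal weight occurs once, any two members carrying it are the same entry
theorem eq_of_count_one {l : List (String × Int)} {w : Int}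
    (h : (l.map (fun t => t.2)).count w = 1) {a b : String × Int}
    (ha : a ∈ l) (hb : b ∈ l) (haw : a.2 = w) (hbw : b.2 = w) : a = b := by
  have hcp : l.countP (fun y => y.2 == w) = 1 := by
    have := List.countP_map (p := fun z : Int => z == w) (f := fun t : String × Int => t.2) (l := l)
    simpa [List.count] using (this ▸ h)
  have hflen : (l.filter (fun y => y.2 == w)).length = 1 := by
    rw [← List.countP_eq_length_filter]; exact hcp
  rcases List.length_eq_one_iff.mp hflen with ⟨c, hc⟩
  have ha' : a ∈ l.filter (fun y => y.2 == w) := List.mem_filter.mpr ⟨ha, by simp [haw]⟩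
  have hb' : b ∈ l.filter (fun y => y.2 == w) := List.mem_filter.mpr ⟨hb, by simp [hbw]⟩
  rw [hc] at ha' hb'
  simp only [List.mem_singleton] at ha' hb'
  rw [ha', hb']

-- ===== VERDICT (by name: the statement is the Claim_ definition above) =====
theorem get_unbalanced_spec : Claim_equal_get_unbalanced := by
  intro lst _ hpre
  unfold Spec_get_unbalanced
  have hsne : PySem.List.sorted lst (fun t => t.2) false ≠ [] := by
    rw [Ne, PySem.List.sorted_eq_nil_iff]; exact hpre
  cases hS : PySem.List.sorted lst (fun t => t.2) false with
  | nil => exact absurd hS hsne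
  | cons mi rest =>
  have hperm : (mi :: rest).Perm lst := hS ▸ PySem.List.sorted_perm lst (fun t => t.2) false
  have hpair : List.Pairwise (fun a b : String × Int => a.2 ≤ b.2) (mi :: rest) :=
    hS ▸ PySem.List.sorted_pairwise lst (fun t => t.2)
  have hmin : PySem.List.min? lst (fun t => t.2) = some mi := by
    rw [← head?_sorted_eq_min?, hS]; rfl
  obtain ⟨maA, hmax⟩ : ∃ m, PySem.List.max? lst (fun t => t.2) = some m := by
    cases hM : PySem.List.max? lst (fun t => t.2) with
    | none => exact absurd ((PySem.List.max?_eq_none_iff lst (fun t => t.2)).mp hM) hpre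
    | some m => exact ⟨m, rfl⟩
  cases hr : (mi :: rest).reverse with
  | nil => simp at hr
  | cons ma zs =>
  -- ma is s[-1], the entry the whole sorted list bounds from above
  have hub : ∀ y ∈ (mi :: rest), y.2 ≤ ma.2 := by
    intro y hy
    have hrev : List.Pairwise (fun a b : String × Int => b.2 ≤ a.2) (ma :: zs) :=
      hr ▸ List.pairwise_reverse.mpr hpair
    have hy' : y ∈ ma :: zs := hr ▸ List.mem_reverse.mpr hy
    rcases List.mem_cons.mp hy' with rfl | hyt
    · exact le_refl _
    · exact (List.pairwise_cons.mp hrev).1 y hyt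
  have hmaL : ma ∈ lst := by
    refine hperm.subset ?_
    have : ma ∈ ma :: zs := List.mem_cons_self
    exact List.mem_reverse.mp (hr ▸ this)
  have hmaxIs : ∀ y ∈ lst, y.2 ≤ maA.2 := PySem.List.max?_isMax hmax
  have hminIs : ∀ y ∈ lst, mi.2 ≤ y.2 := PySem.List.min?_isMin hmin
  have hkey : ma.2 = maA.2 :=
    le_antisymm (hmaxIs ma hmaL) (hub maA (hperm.mem_iff.mpr (PySem.List.max?_mem hmax)))
  have hcmin : countPrefix mi.2 (mi :: rest) = (lst.map (fun t => t.2)).count mi.2 := by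
    rw [countPrefix_eq_count_le hpair (fun y hy => hminIs y (hperm.subset hy))]
    exact (hperm.map (fun t => t.2)).count_eq mi.2
  have hcmax : countPrefix ma.2 ((mi :: rest).reverse) = (lst.map (fun t => t.2)).count maA.2 := by
    rw [countPrefix_eq_count_ge (List.pairwise_reverse.mpr hpair)
      (fun y hy => hkey ▸ hkey.symm ▸ hub y (List.mem_reverse.mp hy))]
    rw [List.map_reverse, List.count_reverse, hkey]
    exact (hperm.map (fun t => t.2)).count_eq maA.2
  have hlen : (mi :: rest).length = lst.length := hperm.length_eq
  have hA : get_unbalanced lst =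
      (if lst.length ≤ 1 ∨ (lst.map (fun t => t.2)).count maA.2 = (lst.map (fun t => t.2)).count mi.2
        then none
        else if (lst.map (fun t => t.2)).count maA.2 = 1 then some (maA, maA.2 - mi.2)
        else some (mi, mi.2 - maA.2)) := by
    simp only [get_unbalanced, hmax, hmin]
  have halt : get_unbalanced_alt lst =
      (if (mi :: rest).length ≤ 1 ∨ countPrefix ma.2 ((mi :: rest).reverse) = countPrefix mi.2 (mi :: rest)
        then none
        else if countPrefix ma.2 ((mi :: rest).reverse) = 1 then some (ma, ma.2 - mi.2)
        else some (mi, mi.2 - ma.2)) := by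
    simp only [get_unbalanced_alt, hS, hr, List.headD_cons]
  rw [hA, halt, hcmin, hcmax, hlen]
  split_ifs with h1 h2
  · rfl
  · have hmaeq : ma = maA :=
      eq_of_count_one h2 hmaL (PySem.List.max?_mem hmax) hkey rfl
    rw [hmaeq]
  · rw [hkey]
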